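-- pv_equiv track=rewrite | github.com/eubrunomiguel/actor_mpi | jobscript-gen/gen_slurm.py | generatePondPar
-- ===== SOURCE A (Python) =====
-- patchSize = 256
--
-- end = 1
--
-- xBase = 4096
--
-- yBase = 4096
--
-- coresPerRank = 64
--
-- def generatePondPar(timesDoubled, rawString, logPrefix):
--     ppPatchSize = patchSize * 2
--     numNodes = 1
--     yMult = 1
--     xMult = 1
--     for i in range(0,timesDoubled):
--         numNodes = numNodes * 2
--         if i % 2 == 0:
--             xMult = xMult * 2
--         else:
--             yMult = yMult * 2
--     cores = coresPerRank * numNodes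
--     xSize = xBase * xMult
--     ySize = yBase * yMult
--     slurmScript = rawString.replace("##NUM_NODES##", str(numNodes))
--     slurmScript = slurmScript.replace("##NUM_RANKS##", str(numNodes))
--     slurmScript = slurmScript.replace("##NUM_CORES##", str(64))
--     slurmScript = slurmScript.replace("##Y_SIZE##", str(ySize))
--     slurmScript = slurmScript.replace("##X_SIZE##", str(xSize))
--     slurmScript = slurmScript.replace("##END##", str(end))
--     slurmScript = slurmScript.replace("##PATCH_SIZE##", str(ppPatchSize))
--     slurmScript = slurmScript.replace("##LOG_PREFIX##", str(logPrefix))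
--     return slurmScript
-- ===== SOURCE B (Python) =====
-- patchSize = 256
--
-- end = 1
--
-- xBase = 4096
--
-- yBase = 4096
--
-- coresPerRank = 64
--
-- def generatePondPar(timesDoubled, rawString, logPrefix):
--     # closed form: after n doublings numNodes = 2**n, x doubled on even steps, y on odd
--     n = max(timesDoubled, 0)
--     numNodes = 1 << n
--     xMult = 1 << ((n + 1) // 2)
--     yMult = 1 << (n // 2)
--     subs = [
--         ("##NUM_NODES##", str(numNodes)),
--         ("##NUM_RANKS##", str(numNodes)),
--         ("##NUM_CORES##", "64"),
--         ("##Y_SIZE##", str(yBase * yMult)),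
--         ("##X_SIZE##", str(xBase * xMult)),
--         ("##END##", str(end)),
--         ("##PATCH_SIZE##", str(patchSize * 2)),
--         ("##LOG_PREFIX##", str(logPrefix)),
--     ]
--     s = rawString
--     for old, new in subs:
--         s = s.replace(old, new)
--     return s
-- ===== Notes on version B (the rewrite author's own statement) =====
-- stated objective: faster
-- what changed: Replaces the O(timesDoubled) doubling loop with closed-form bit-shifts (numNodes = 2**n, xMult = 2**((n+1)//2), yMult = 2**(n//2) with n = max(timesDoubled,0)) and performs the substitutions as one table-driven loop instead of a chain of statements.
import Mathlib
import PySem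

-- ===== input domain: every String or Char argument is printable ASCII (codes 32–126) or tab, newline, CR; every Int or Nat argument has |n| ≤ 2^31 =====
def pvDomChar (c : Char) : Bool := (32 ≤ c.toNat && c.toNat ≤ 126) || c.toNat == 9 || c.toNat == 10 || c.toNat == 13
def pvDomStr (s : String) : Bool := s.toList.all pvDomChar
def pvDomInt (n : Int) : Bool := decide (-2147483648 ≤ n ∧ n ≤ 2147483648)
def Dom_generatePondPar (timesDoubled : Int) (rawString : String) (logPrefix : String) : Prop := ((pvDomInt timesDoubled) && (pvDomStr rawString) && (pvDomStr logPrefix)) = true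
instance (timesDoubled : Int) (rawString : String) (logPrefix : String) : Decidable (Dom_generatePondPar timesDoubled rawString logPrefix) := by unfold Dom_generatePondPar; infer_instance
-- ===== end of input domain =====

-- B replaces A's O(timesDoubled) doubling loop by closed-form powers of two and a
-- table-driven substitution loop; same return value on all inputs.

-- ===== PORT A =====
-- loop body of A's 'for i in range(0, timesDoubled)' over state (numNodes, xMult, yMult)
def pondStep (s : Int × Int × Int) (i : Int) : Int × Int × Int :=
  let numNodes := s.1 * 2
  if PySem.Int.mod i 2 == 0 then (numNodes, s.2.1 * 2, s.2.2)
  else (numNodes, s.2.1, s.2.2 * 2)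

def generatePondPar (timesDoubled : Int) (rawString : String) (logPrefix : String) : String :=
  let ppPatchSize : Int := 256 * 2
  let st := (PySem.List.pyRange 0 timesDoubled 1).foldl pondStep (1, 1, 1)
  let numNodes := st.1
  let xMult := st.2.1
  let yMult := st.2.2
  let xSize : Int := 4096 * xMult
  let ySize : Int := 4096 * yMult
  let slurmScript := PySem.Str.replace rawString "##NUM_NODES##" (PySem.Int.toStr numNodes)
  let slurmScript := PySem.Str.replace slurmScript "##NUM_RANKS##" (PySem.Int.toStr numNodes)
  let slurmScript := PySem.Str.replace slurmScript "##NUM_CORES##" (PySem.Int.toStr 64)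
  let slurmScript := PySem.Str.replace slurmScript "##Y_SIZE##" (PySem.Int.toStr ySize)
  let slurmScript := PySem.Str.replace slurmScript "##X_SIZE##" (PySem.Int.toStr xSize)
  let slurmScript := PySem.Str.replace slurmScript "##END##" (PySem.Int.toStr 1)
  let slurmScript := PySem.Str.replace slurmScript "##PATCH_SIZE##" (PySem.Int.toStr ppPatchSize)
  let slurmScript := PySem.Str.replace slurmScript "##LOG_PREFIX##" logPrefix
  slurmScript

-- ===== PORT B =====
-- '1 << k' on a nonnegative Python int is 2 ^ k; n = max(timesDoubled, 0) is nonnegative, so .toNat is exact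
def generatePondPar_alt (timesDoubled : Int) (rawString : String) (logPrefix : String) : String :=
  let n : Nat := (max timesDoubled 0).toNat
  let numNodes : Int := 2 ^ n
  let xMult : Int := 2 ^ ((n + 1) / 2)
  let yMult : Int := 2 ^ (n / 2)
  let subs : List (String × String) :=
    [("##NUM_NODES##", PySem.Int.toStr numNodes),
     ("##NUM_RANKS##", PySem.Int.toStr numNodes),
     ("##NUM_CORES##", "64"),
     ("##Y_SIZE##", PySem.Int.toStr (4096 * yMult)),
     ("##X_SIZE##", PySem.Int.toStr (4096 * xMult)),
     ("##END##", PySem.Int.toStr 1),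
     ("##PATCH_SIZE##", PySem.Int.toStr (256 * 2)),
     ("##LOG_PREFIX##", logPrefix)]
  subs.foldl (fun s p => PySem.Str.replace s p.1 p.2) rawString

-- ===== PRECONDITION & SPEC =====
def Spec_generatePondPar (timesDoubled : Int) (rawString : String) (logPrefix : String) (out : String) : Prop := out = generatePondPar_alt timesDoubled rawString logPrefix
instance (timesDoubled : Int) (rawString : String) (logPrefix : String) (out : String) : Decidable (Spec_generatePondPar timesDoubled rawString logPrefix out) := by unfold Spec_generatePondPar; infer_instance

-- ===== CLAIM (what is proved, stated in full; the proofs are below) =====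
def Claim_equal_generatePondPar : Prop := ∀ (timesDoubled : Int) (rawString : String) (logPrefix : String), Dom_generatePondPar timesDoubled rawString logPrefix → Spec_generatePondPar timesDoubled rawString logPrefix (generatePondPar timesDoubled rawString logPrefix)

-- ===== LEMMAS AND PROOFS =====

lemma pondStep_range (n : Nat) :
    (List.range n).foldl (fun s k => pondStep s (Int.ofNat k)) ((1, 1, 1) : Int × Int × Int)
      = (2 ^ n, 2 ^ ((n + 1) / 2), 2 ^ (n / 2)) := by
  induction n with
  | zero => simp
  | succ n ih =>
    rw [List.range_succ, List.foldl_append, ih]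
    simp only [List.foldl_cons, List.foldl_nil, pondStep]
    rcases Nat.even_or_odd n with h | h
    · obtain ⟨k, hk⟩ := h
      have h1 : (n + 1 + 1) / 2 = (n + 1) / 2 + 1 := by omega
      have h2 : (n + 1) / 2 = n / 2 := by omega
      simp [h1, h2, pow_succ]
      omega
    · obtain ⟨k, hk⟩ := h
      have h1 : (n + 1 + 1) / 2 = (n + 1) / 2 := by omega
      have h2 : (n + 1) / 2 = n / 2 + 1 := by omega
      simp [h1, h2, pow_succ]
      omega

lemma pond_loop_closed (t : Int) :
    (PySem.List.pyRange 0 t 1).foldl pondStep ((1, 1, 1) : Int × Int × Int)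
      = (2 ^ t.toNat, 2 ^ ((t.toNat + 1) / 2), 2 ^ (t.toNat / 2)) := by
  rw [PySem.List.pyRange_one]
  have : (t - 0).toNat = t.toNat := by omega
  rw [this, List.foldl_map]
  simpa using pondStep_range t.toNat

-- ===== VERDICT (by name: the statement is the Claim_ definition above) =====
theorem generatePondPar_spec : Claim_equal_generatePondPar := by
  intro t raw lp _
  show _ = _
  have hmax : (max t 0).toNat = t.toNat := by omega
  have h64 : PySem.Int.toStr 64 = "64" := rfl
  simp only [generatePondPar, generatePondPar_alt, pond_loop_closed, hmax, h64,
    List.foldl_cons, List.foldl_nil]
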